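-- pv_equiv track=rewrite | github.com/fab-jul/fjcommon | fjcommon/iterable_tools.py | flag_first_iter
-- ===== SOURCE A (Python) =====
-- def flag_first_iter(it):
--     it = iter(it)
--     try:
--         first_el = next(it)
--         yield True, first_el
--     except StopIteration:
--         return
--     for el in it:
--         yield False, el
-- ===== SOURCE B (Python) =====
-- def flag_first_iter(it):
--     first = True
--     for el in it:
--         yield first, el
--         first = False
-- ===== Notes on version B (the rewrite author's own statement) =====
-- stated objective: simpler
-- what changed: Replaced the two-phase next()/try-except head-peeling generator with a single uniform loop that carries a boolean first-element flag.
import Mathlib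
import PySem

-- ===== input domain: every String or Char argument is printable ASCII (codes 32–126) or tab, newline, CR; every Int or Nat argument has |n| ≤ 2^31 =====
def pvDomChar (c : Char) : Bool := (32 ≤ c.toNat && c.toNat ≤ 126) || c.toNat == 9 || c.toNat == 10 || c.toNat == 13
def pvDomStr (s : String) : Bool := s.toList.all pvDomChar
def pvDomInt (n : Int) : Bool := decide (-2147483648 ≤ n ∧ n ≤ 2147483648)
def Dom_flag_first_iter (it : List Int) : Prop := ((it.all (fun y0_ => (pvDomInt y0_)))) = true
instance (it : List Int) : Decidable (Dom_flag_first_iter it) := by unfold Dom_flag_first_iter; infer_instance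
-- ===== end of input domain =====

-- ===== PORT A =====
-- A: peel the first element (yield True), then a loop yielding False for the rest.
def flag_first_iter (it : List Int) : List (Bool × Int) :=
  match it with
  | [] => []
  | first_el :: rest => (true, first_el) :: rest.map (fun el => (false, el))

-- ===== PORT B =====
-- B: one uniform loop carrying a boolean first-element flag.
def flagLoop (first : Bool) (it : List Int) : List (Bool × Int) :=
  match it with
  | [] => []
  | el :: rest => (first, el) :: flagLoop false rest

def flag_first_iter_alt (it : List Int) : List (Bool × Int) := flagLoop true it

-- ===== PRECONDITION & SPEC =====
def Spec_flag_first_iter (it : List Int) (out : List (Bool × Int)) : Prop := out = flag_first_iter_alt it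
instance (it : List Int) (out : List (Bool × Int)) : Decidable (Spec_flag_first_iter it out) := by unfold Spec_flag_first_iter; infer_instance

-- ===== CLAIM (what is proved, stated in full; the proofs are below) =====
def Claim_equal_flag_first_iter : Prop := ∀ (it : List Int), Dom_flag_first_iter it → Spec_flag_first_iter it (flag_first_iter it)

-- ===== LEMMAS AND PROOFS =====

-- ===== VERDICT (by name: the statement is the Claim_ definition above) =====
theorem flagLoop_false (it : List Int) : flagLoop false it = it.map (fun el => (false, el)) := by
  induction it with
  | nil => rfl
  | cons x xs ih => simp [flagLoop, ih]

theorem flag_first_iter_spec : Claim_equal_flag_first_iter := by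
  intro it _
  unfold Spec_flag_first_iter flag_first_iter flag_first_iter_alt
  cases it with
  | nil => rfl
  | cons x xs => simp [flagLoop, flagLoop_false]
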